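-- pv_equiv track=rewrite | github.com/bendikjohansen/adventofcode | aoc/aoc2020/days/day13/part_2.py | index_offsets
-- ===== SOURCE A (Python) =====
-- from typing import List
--
-- def index_offsets(ids: List[int]) -> int:
--     offsets = [0]
--     for id in ids:
--         if id == 0:
--             offsets[-1] += 1
--         else:
--             offsets.append(offsets[-1] + 1)
--     return offsets[:-1]
-- ===== SOURCE B (Python) =====
-- from typing import List
--
-- def index_offsets(ids: List[int]) -> int:
--     return [i for i, x in enumerate(ids) if x != 0]
-- ===== Notes on version B (the rewrite author's own statement) =====
-- stated objective: simpler
-- what changed: A's result is exactly the indices of the non-zero entries; B computes them directly with an enumerate comprehension, dropping A's sentinel accumulator list, the increment/append branching and the trailing [:-1].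
import Mathlib
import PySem

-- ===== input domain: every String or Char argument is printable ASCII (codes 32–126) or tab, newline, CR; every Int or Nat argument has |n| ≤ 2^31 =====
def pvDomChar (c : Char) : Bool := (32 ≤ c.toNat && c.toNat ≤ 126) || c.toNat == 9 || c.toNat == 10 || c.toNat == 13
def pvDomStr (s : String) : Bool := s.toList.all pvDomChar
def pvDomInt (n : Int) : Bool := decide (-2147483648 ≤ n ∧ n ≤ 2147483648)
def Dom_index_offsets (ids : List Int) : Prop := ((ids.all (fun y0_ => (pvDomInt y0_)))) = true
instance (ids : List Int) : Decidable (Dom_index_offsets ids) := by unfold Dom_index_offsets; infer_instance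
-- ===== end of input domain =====

-- B replaces A's sentinel-accumulator bookkeeping by directly emitting the index of each non-zero entry (objective: simpler).

-- ===== PORT A =====
-- one loop step of A: offsets[-1] += 1 when id == 0, else offsets.append(offsets[-1] + 1)
def indexOffsetsStep (offsets : List Int) (id : Int) : List Int :=
  if id = 0 then offsets.dropLast ++ [offsets.getLastD 0 + 1]
  else offsets ++ [offsets.getLastD 0 + 1]

def index_offsets (ids : List Int) : List Int :=
  (ids.foldl indexOffsetsStep [0]).dropLast

-- ===== PORT B =====
-- [i for i, x in enumerate(ids) if x != 0], carrying the running index i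
def indexOffsetsAltGo (i : Int) : List Int → List Int
  | [] => []
  | x :: xs => if x ≠ 0 then i :: indexOffsetsAltGo (i + 1) xs else indexOffsetsAltGo (i + 1) xs

def index_offsets_alt (ids : List Int) : List Int := indexOffsetsAltGo 0 ids

-- ===== PRECONDITION & SPEC =====
def Spec_index_offsets (ids : List Int) (out : List Int) : Prop := out = index_offsets_alt ids
instance (ids : List Int) (out : List Int) : Decidable (Spec_index_offsets ids out) := by unfold Spec_index_offsets; infer_instance

-- ===== CLAIM (what is proved, stated in full; the proofs are below) =====
def Claim_equal_index_offsets : Prop := ∀ (ids : List Int), Dom_index_offsets ids → Spec_index_offsets ids (index_offsets ids)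

-- ===== LEMMAS AND PROOFS =====
-- Invariant of A's loop: from any state acc ++ [c], the fold commits c + (index of each
-- non-zero id) and ends with running value c + ids.length at the back.
theorem indexOffsets_fold_inv (ids : List Int) : ∀ (acc : List Int) (c : Int),
    ids.foldl indexOffsetsStep (acc ++ [c]) =
      (acc ++ indexOffsetsAltGo c ids) ++ [c + (ids.length : Int)] := by
  induction ids with
  | nil => intro acc c; simp [indexOffsetsAltGo]
  | cons x xs ih =>
    intro acc c
    by_cases hx : x = 0
    · have h1 : indexOffsetsStep (acc ++ [c]) x = acc ++ [c + 1] := by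
        simp [indexOffsetsStep, hx]
      rw [List.foldl_cons, h1, ih acc (c + 1)]
      simp [indexOffsetsAltGo, hx]
      ring_nf
    · have h1 : indexOffsetsStep (acc ++ [c]) x = (acc ++ [c]) ++ [c + 1] := by
        simp [indexOffsetsStep, hx]
      rw [List.foldl_cons, h1, ih (acc ++ [c]) (c + 1)]
      simp [indexOffsetsAltGo, hx]
      ring_nf

-- ===== VERDICT (by name: the statement is the Claim_ definition above) =====
theorem index_offsets_spec : Claim_equal_index_offsets := by
  intro ids _
  unfold Spec_index_offsets index_offsets index_offsets_alt
  have h := indexOffsets_fold_inv ids [] 0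
  simp at h
  simp [h]
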